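-- pv_equiv track=rewrite | github.com/prokopyev/SeekingAlpha_project | text_parser/one_text_parser.py | get_oper_chunks
-- ===== SOURCE A (Python) =====
-- def get_oper_chunks(text_data, qa_start):
--     oper_flags = []
--     for p in range(qa_start, len(text_data)):
--         if '<strong>Operator' in str(text_data[p]):
--             oper_flags.append(
--                 p
--             )
--     oper_chunks =  []
--     for f in range(len(oper_flags) - 1):
--         oper_chunks.append(
--             text_data[oper_flags[f]:oper_flags[f + 1]]
--         )
--     return oper_chunks
-- ===== SOURCE B (Python) =====
-- def get_oper_chunks(text_data, qa_start):
--     chunks = []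
--     last = None
--     for p in range(qa_start, len(text_data)):
--         if '<strong>Operator' in str(text_data[p]):
--             if last is not None:
--                 chunks.append(text_data[last:p])
--             last = p
--     return chunks
-- ===== Notes on version B (the rewrite author's own statement) =====
-- stated objective: simpler
-- what changed: B replaces A's two-pass structure (build an index list of marker positions, then a second indexed loop slicing between consecutive indices) by a single linear scan that remembers only the previous marker position and appends each slice as soon as the next marker is seen.
import Mathlib
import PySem

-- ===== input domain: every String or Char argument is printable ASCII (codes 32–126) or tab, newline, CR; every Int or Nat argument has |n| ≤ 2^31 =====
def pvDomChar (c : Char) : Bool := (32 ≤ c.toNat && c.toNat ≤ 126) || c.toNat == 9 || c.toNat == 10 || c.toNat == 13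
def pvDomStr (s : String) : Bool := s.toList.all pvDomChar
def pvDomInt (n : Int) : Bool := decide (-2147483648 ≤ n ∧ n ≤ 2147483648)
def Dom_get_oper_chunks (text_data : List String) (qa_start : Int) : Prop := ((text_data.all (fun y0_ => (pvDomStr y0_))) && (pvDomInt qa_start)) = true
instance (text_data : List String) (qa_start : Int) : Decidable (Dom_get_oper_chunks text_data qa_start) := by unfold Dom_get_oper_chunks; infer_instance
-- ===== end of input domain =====

-- B does the same work in one scan (previous marker position instead of an index table); same cost, simpler shape.

-- ===== PORT A =====
def get_oper_chunks (text_data : List String) (qa_start : Int) : List (List String) :=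
  let oper_flags : List Int :=
    (PySem.List.pyRange qa_start (text_data.length : Int) 1).foldl
      (fun acc p =>
        if PySem.Str.isIn "<strong>Operator" (PySem.List.pyGetD text_data p "") then acc ++ [p]
        else acc) []
  (PySem.List.pyRange 0 ((oper_flags.length : Int) - 1) 1).foldl
    (fun acc f =>
      acc ++ [PySem.List.slice text_data (some (PySem.List.pyGetD oper_flags f 0))
                                         (some (PySem.List.pyGetD oper_flags (f + 1) 0))]) []

-- ===== PORT B =====
def get_oper_chunks_alt (text_data : List String) (qa_start : Int) : List (List String) :=
  ((PySem.List.pyRange qa_start (text_data.length : Int) 1).foldl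
      (fun (st : List (List String) × Option Int) p =>
        if PySem.Str.isIn "<strong>Operator" (PySem.List.pyGetD text_data p "") then
          (match st.2 with
           | some l => st.1 ++ [PySem.List.slice text_data (some l) (some p)]
           | none => st.1,
           some p)
        else st)
      ([], none)).1

-- ===== PRECONDITION & SPEC =====
-- A indexes text_data[p] for every p in range(qa_start, len); it raises IndexError exactly when qa_start < -len.
def Pre_get_oper_chunks (text_data : List String) (qa_start : Int) : Prop :=
  -(text_data.length : Int) ≤ qa_start
instance (text_data : List String) (qa_start : Int) : Decidable (Pre_get_oper_chunks text_data qa_start) := by unfold Pre_get_oper_chunks; infer_instance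
def pvWitness_get_oper_chunks : List String × Int := (["<strong>Operator Ann", "hello", "<strong>Operator Bob"], 0)

def Spec_get_oper_chunks (text_data : List String) (qa_start : Int) (out : List (List String)) : Prop := out = get_oper_chunks_alt text_data qa_start
instance (text_data : List String) (qa_start : Int) (out : List (List String)) : Decidable (Spec_get_oper_chunks text_data qa_start out) := by unfold Spec_get_oper_chunks; infer_instance

-- ===== CLAIM (what is proved, stated in full; the proofs are below) =====
def Claim_equal_get_oper_chunks : Prop := ∀ (text_data : List String) (qa_start : Int), Dom_get_oper_chunks text_data qa_start → Pre_get_oper_chunks text_data qa_start → Spec_get_oper_chunks text_data qa_start (get_oper_chunks text_data qa_start)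

-- ===== LEMMAS AND PROOFS =====

/-- The list of slices between consecutive entries of `flags`. -/
def adjSlices (td : List String) : List Int → List (List String)
  | [] => []
  | [_] => []
  | a :: b :: rest => PySem.List.slice td (some a) (some b) :: adjSlices td (b :: rest)

/-- A's second loop, read off over indices: consecutive-pair slices. -/
theorem range_map_adjSlices (td : List String) :
    ∀ (flags : List Int),
      (List.range (flags.length - 1)).map
        (fun k => PySem.List.slice td (some (flags.getD k 0)) (some (flags.getD (k + 1) 0)))
      = adjSlices td flags := by
  intro flags
  induction flags with
  | nil => simp [adjSlices]
  | cons a rest ih =>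
    cases rest with
    | nil => simp [adjSlices]
    | cons b t =>
      have h : (a :: b :: t).length - 1 = t.length + 1 := by simp
      rw [h, List.range_succ_eq_map, List.map_cons, List.map_map]
      simp only [adjSlices]
      refine congrArg₂ List.cons ?_ ?_
      · simp
      · rw [← ih]
        apply List.map_congr_left
        intro k _
        simp [Function.comp]

/-- B's single scan, as a state machine: the accumulated chunks are the
    consecutive-pair slices of (pending marker ++ markers seen in the rest). -/
theorem alt_fold_adjSlices (td : List String) (c : Int → Bool) :
    ∀ (L : List Int) (acc : List (List String)) (last? : Option Int),
      (L.foldl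
        (fun (st : List (List String) × Option Int) p =>
          if c p then
            (match st.2 with
             | some l => st.1 ++ [PySem.List.slice td (some l) (some p)]
             | none => st.1,
             some p)
          else st)
        (acc, last?)).1
      = acc ++ adjSlices td ((match last? with | none => ([] : List Int) | some l => [l]) ++ L.filter c) := by
  intro L
  induction L with
  | nil =>
    intro acc last?
    cases last? <;> simp [adjSlices]
  | cons x L ih =>
    intro acc last?
    by_cases hc : c x
    · cases last? with
      | none =>
        simp only [List.foldl_cons, hc, if_pos, List.filter_cons_of_pos hc]
        exact ih acc (some x)
      | some l =>
        simp only [List.foldl_cons, hc, if_pos, List.filter_cons_of_pos hc]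
        rw [ih (acc ++ [PySem.List.slice td (some l) (some x)]) (some x)]
        simp [adjSlices]
    · simp only [List.foldl_cons, hc, List.filter_cons_of_neg hc]
      exact ih acc last?

/-- A's second loop after `foldl_append_singleton_eq_map` and `pyRange_one`. -/
theorem second_loop_adjSlices (td : List String) (flags : List Int) :
    (List.range (((flags.length : Int) - 1 - 0).toNat)).map
      ((fun f => PySem.List.slice td (some (PySem.List.pyGetD flags f 0))
          (some (PySem.List.pyGetD flags (f + 1) 0))) ∘ (fun k : Nat => (0 : Int) + k))
    = adjSlices td flags := by
  have htn : ((flags.length : Int) - 1 - 0).toNat = flags.length - 1 := by omega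
  rw [htn, ← range_map_adjSlices td flags]
  apply List.map_congr_left
  intro k _
  simp only [Function.comp, zero_add]
  have h1 : PySem.List.pyGetD flags (k : Int) 0 = flags.getD k 0 :=
    PySem.List.pyGetD_natCast flags k 0
  have h2 : PySem.List.pyGetD flags ((k : Int) + 1) 0 = flags.getD (k + 1) 0 := by
    have : ((k : Int) + 1) = ((k + 1 : Nat) : Int) := by push_cast; ring
    rw [this]
    exact PySem.List.pyGetD_natCast flags (k + 1) 0
  rw [h1, h2]

-- ===== VERDICT (by name: the statement is the Claim_ definition above) =====
theorem get_oper_chunks_spec : Claim_equal_get_oper_chunks := by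
  intro text_data qa_start _ _
  unfold Spec_get_oper_chunks get_oper_chunks get_oper_chunks_alt
  generalize PySem.List.pyRange qa_start (text_data.length : Int) 1 = L
  rw [PySem.List.foldl_append_if_eq_filter,
      alt_fold_adjSlices text_data
        (fun p => PySem.Str.isIn "<strong>Operator" (PySem.List.pyGetD text_data p "")) L [] none]
  simp only [List.nil_append]
  generalize List.filter (fun p => PySem.Str.isIn "<strong>Operator" (PySem.List.pyGetD text_data p "")) L = flags
  rw [PySem.List.foldl_append_singleton_eq_map, PySem.List.pyRange_one, List.map_map]
  simp only [List.nil_append]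
  rw [second_loop_adjSlices]
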